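-- pv_equiv track=rewrite | github.com/hello2263/programmers | test_0526_2.py | solution
-- ===== SOURCE A (Python) =====
-- def solution(answers):
--     answer = []
--     i = 0
--     j = 0
--     s_1 = [1, 2, 3, 4, 5]
--     s_1 = s_1 * 2000
--     count_1 = 0
--
--     s_2 = [2, 1, 2, 3, 2, 4, 2, 5]
--     s_2 = s_2 * 1250
--     count_2 = 0
--
--     s_3 = [3, 3, 1, 1, 2, 2, 4, 4, 5, 5]
--     s_3 = s_3 * 1000
--     count_3 = 0
--
--     while (i < len(answers)):
--         if (s_1[i] == answers[j]):
--             count_1 += 1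
--         if (s_2[i] == answers[j]):
--             count_2 += 1
--         if (s_3[i] == answers[j]):
--             count_3 += 1
--         i += 1
--         j += 1
--         if (j > len(answers)):
--             j = 0
--     if (count_1 < count_2):
--         if (count_2<count_3):
--             answer.append(3)
--         elif (count_2>count_3):
--             answer.append(2)
--         else:
--             answer.append(2)
--             answer.append(3)
--     elif (count_1 > count_2):
--         if (count_1 < count_3):
--             answer.append(3)
--         elif (count_1 > count_3):
--             answer.append(1)
--         else:
--             answer.append(1)
--             answer.append(3)
--     else:
--         if (count_1 < count_3):
--             answer.append(3)
--         elif (count_1 >count_3):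
--             answer.append(1)
--             answer.append(2)
--         else:
--             answer.append(1)
--             answer.append(2)
--             answer.append(3)
--
--
--     answer=sorted(answer)
--     return answer
-- ===== SOURCE B (Python) =====
-- def solution(answers):
--     # Different algorithm: one pass builds a histogram keyed by (position mod 40, value)
--     # (40 = lcm of the three pattern periods 5, 8, 10); each pattern's score is then
--     # read off with 40 histogram lookups, so answers are never compared to patterns
--     # element by element.
--     hist = {}
--     for i, a in enumerate(answers):
--         key = (i % 40, a)
--         hist[key] = hist.get(key, 0) + 1
--     patterns = {1: [1, 2, 3, 4, 5],
--                 2: [2, 1, 2, 3, 2, 4, 2, 5],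
--                 3: [3, 3, 1, 1, 2, 2, 4, 4, 5, 5]}
--     scores = {k: sum(hist.get((r, p[r % len(p)]), 0) for r in range(40))
--               for k, p in patterns.items()}
--     best = max(scores.values())
--     return [k for k in (1, 2, 3) if scores[k] == best]
-- ===== Notes on version B (the rewrite author's own statement) =====
-- stated objective: alternative
-- what changed: B never compares answers to patterns element by element: one pass builds a histogram keyed by (position mod 40, value) (40 = lcm of the pattern periods 5/8/10), each pattern's score is then read off with 40 histogram lookups, and the winners come from max-then-filter instead of A's pre-multiplied 10000-element lists walked by a while loop feeding a nine-branch comparison tree plus a final sort.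
import Mathlib
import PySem

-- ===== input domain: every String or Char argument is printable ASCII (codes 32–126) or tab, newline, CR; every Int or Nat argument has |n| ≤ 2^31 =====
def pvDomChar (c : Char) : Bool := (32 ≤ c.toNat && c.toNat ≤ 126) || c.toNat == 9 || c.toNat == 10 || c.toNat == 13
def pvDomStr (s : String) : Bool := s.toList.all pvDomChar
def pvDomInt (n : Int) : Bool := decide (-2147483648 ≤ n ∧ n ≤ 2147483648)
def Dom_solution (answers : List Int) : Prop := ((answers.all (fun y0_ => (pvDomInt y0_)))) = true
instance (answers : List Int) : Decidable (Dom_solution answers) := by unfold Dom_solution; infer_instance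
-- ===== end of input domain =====

-- B replaces A's per-element comparison against three pre-multiplied 10000-element
-- pattern lists by a one-pass histogram keyed by (position mod 40, value) (40 = lcm of
-- the pattern periods) followed by 40 histogram lookups per pattern, then max-filter.

-- ===== PORT A =====
-- the while loop of A: state (i, j, count_1, count_2, count_3); answers[j] is always in
-- range while the loop runs (j = i < len), so List.getD's default is never used for
-- `answers`; s_k[i] (getD on the length-10000 lists) is in range exactly under Pre_solution.
def pvWhileA (answers s1 s2 s3 : List Int) (i j : Nat) (c1 c2 c3 : Int) : Int × Int × Int :=
  if _h : i < answers.length then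
    let a := answers.getD j 0
    let c1' := if s1.getD i 0 = a then c1 + 1 else c1
    let c2' := if s2.getD i 0 = a then c2 + 1 else c2
    let c3' := if s3.getD i 0 = a then c3 + 1 else c3
    let j' := if j + 1 > answers.length then 0 else j + 1
    pvWhileA answers s1 s2 s3 (i + 1) j' c1' c2' c3'
  else (c1, c2, c3)
termination_by answers.length - i

def solution (answers : List Int) : List Int :=
  let s1 := PySem.List.pyRepeat [1, 2, 3, 4, 5] 2000
  let s2 := PySem.List.pyRepeat [2, 1, 2, 3, 2, 4, 2, 5] 1250
  let s3 := PySem.List.pyRepeat [3, 3, 1, 1, 2, 2, 4, 4, 5, 5] 1000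
  let c := pvWhileA answers s1 s2 s3 0 0 0 0 0
  let c1 := c.1; let c2 := c.2.1; let c3 := c.2.2
  let answer : List Int :=
    if c1 < c2 then
      (if c2 < c3 then [3] else if c2 > c3 then [2] else [2, 3])
    else if c1 > c2 then
      (if c1 < c3 then [3] else if c1 > c3 then [1] else [1, 3])
    else
      (if c1 < c3 then [3] else if c1 > c3 then [1, 2] else [1, 2, 3])
  PySem.List.sorted answer (fun x => x) false

-- ===== PORT B =====
-- hist = {}; for i, a in enumerate(answers): key = (i % 40, a); hist[key] = hist.get(key, 0) + 1
def pvHist (answers : List Int) : PySem.Dict (Int × Int) Int :=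
  (PySem.List.enumerate answers).foldl
    (fun d ia =>
      let key := (PySem.Int.mod ia.1 40, ia.2)
      d.insert key (d.getD key 0 + 1))
    PySem.Dict.empty

-- sum(hist.get((r, p[r % len(p)]), 0) for r in range(40)); p's entries are literal 1..5
def pvDot (hist : PySem.Dict (Int × Int) Int) (p : List Int) : Int :=
  ((PySem.List.pyRange 0 40 1).map
    (fun r => hist.getD (r, PySem.List.pyGetD p (PySem.Int.mod r (PySem.List.len p)) 0) 0)).sum

def solution_alt (answers : List Int) : List Int :=
  let hist := pvHist answers
  let scores := (((PySem.Dict.empty : PySem.Dict Int Int).insert 1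
      (pvDot hist [1, 2, 3, 4, 5])).insert 2
      (pvDot hist [2, 1, 2, 3, 2, 4, 2, 5])).insert 3
      (pvDot hist [3, 3, 1, 1, 2, 2, 4, 4, 5, 5])
  -- max(scores.values()): Python's running maximum (first maximal value wins)
  let best := (PySem.Dict.values scores).foldl (fun m v => if v > m then v else m)
      (scores.getD 1 0)
  ([1, 2, 3] : List Int).filter (fun k => scores.getD k 0 == best)

-- ===== PRECONDITION & SPEC =====
-- Pre_ excludes exactly the inputs with more than 10000 answers, on which A raises
-- IndexError (s_1[i] past the end of the pre-multiplied pattern list); B returns there.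
def Pre_solution (answers : List Int) : Prop := answers.length ≤ 10000
instance (answers : List Int) : Decidable (Pre_solution answers) := by unfold Pre_solution; infer_instance
def pvWitness_solution : List Int := [1, 3, 2, 4, 2]

def Spec_solution (answers : List Int) (out : List Int) : Prop := out = solution_alt answers
instance (answers : List Int) (out : List Int) : Decidable (Spec_solution answers out) := by unfold Spec_solution; infer_instance

-- ===== CLAIM (what is proved, stated in full; the proofs are below) =====
def Claim_equal_solution : Prop := ∀ (answers : List Int), Dom_solution answers → Pre_solution answers → Spec_solution answers (solution answers)

-- ===== LEMMAS AND PROOFS =====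

-- reference count: matches of `p` cycled from position `i` against the remaining answers
def pvCnt (p : List Int) : List Int → Nat → Int
  | [], _ => 0
  | a :: rest, i => (if p.getD (i % p.length) 0 = a then (1 : Int) else 0) + pvCnt p rest (i + 1)

lemma sum_ind_notmem (f : Int → Int) (k : Int × Int) : ∀ (R : List Int), k.1 ∉ R →
    (R.map (fun r => if k = (r, f r) then (1 : Int) else 0)).sum = 0 := by
  intro R
  induction R with
  | nil => intro _; simp
  | cons r rest ih =>
    intro h
    simp only [List.mem_cons, not_or] at h
    simp only [List.map, List.sum_cons, ih h.2, add_zero]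
    have : ¬ k = (r, f r) := by intro hk; exact h.1 (by rw [hk])
    simp [this]

lemma sum_ind_mem (f : Int → Int) (k : Int × Int) : ∀ (R : List Int), R.Nodup → k.1 ∈ R →
    (R.map (fun r => if k = (r, f r) then (1 : Int) else 0)).sum
      = if k.2 = f k.1 then 1 else 0 := by
  intro R
  induction R with
  | nil => intro _ h; simp at h
  | cons r rest ih =>
    intro hnd hmem
    rw [List.nodup_cons] at hnd
    simp only [List.map, List.sum_cons]
    rcases List.mem_cons.mp hmem with h1 | h1
    · rw [sum_ind_notmem f k rest (by rw [h1]; exact hnd.1), add_zero, ← h1]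
      rcases k with ⟨k1, k2⟩
      by_cases h2 : k2 = f k1 <;> simp [Prod.ext_iff, h2]
    · have hne : ¬ k = (r, f r) := by
        intro hk
        have : k.1 = r := by rw [hk]
        exact hnd.1 (this ▸ h1)
      rw [if_neg hne, zero_add]
      exact ih hnd.2 h1

def pvR40 : List Int := (List.range 40).map (fun i => (i : Int))

lemma pvR40_nodup : pvR40.Nodup := by decide

lemma dot_eq_cnt (p : List Int) (hdvd : p.length ∣ 40) :
    ∀ (xs : List Int) (n : Nat),
    (pvR40.map (fun r =>
        ((((PySem.List.enumerate xs (n : Int)).map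
            (fun ia => (PySem.Int.mod ia.1 40, ia.2))).count
          (r, PySem.List.pyGetD p (PySem.Int.mod r (PySem.List.len p)) 0) : Nat) : Int))).sum
      = pvCnt p xs n := by
  intro xs
  induction xs with
  | nil => intro n; simp [PySem.List.enumerate_nil, pvCnt]
  | cons a rest ih =>
    intro n
    rw [PySem.List.enumerate_cons]
    have hcast : ((n : Int) + 1) = ((n + 1 : Nat) : Int) := by push_cast; ring
    rw [hcast]
    simp only [List.map, List.count_cons]
    have hbeq : ∀ x y : Int × Int, (x == y) = decide (x = y) := by
      intro x y; by_cases h : x = y <;> simp [h]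
    simp only [hbeq, decide_eq_true_eq]
    have hsplit :
        (pvR40.map (fun r =>
          (((((PySem.List.enumerate rest ((n+1 : Nat) : Int)).map
              (fun ia => (PySem.Int.mod ia.1 40, ia.2))).count
            (r, PySem.List.pyGetD p (PySem.Int.mod r (PySem.List.len p)) 0))
            + (if ((PySem.Int.mod (n : Int) 40, a)
                  = (r, PySem.List.pyGetD p (PySem.Int.mod r (PySem.List.len p)) 0)) then 1 else 0) : Nat) : Int))).sum
        = (pvR40.map (fun r =>
            ((((PySem.List.enumerate rest ((n+1 : Nat) : Int)).map
                (fun ia => (PySem.Int.mod ia.1 40, ia.2))).count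
              (r, PySem.List.pyGetD p (PySem.Int.mod r (PySem.List.len p)) 0) : Nat) : Int))).sum
          + (pvR40.map (fun r =>
              if ((PySem.Int.mod (n : Int) 40, a)
                  = (r, PySem.List.pyGetD p (PySem.Int.mod r (PySem.List.len p)) 0)) then (1 : Int) else 0)).sum := by
      rw [← List.sum_map_add]
      congr 1
      apply List.map_congr_left
      intro r _
      push_cast
      split_ifs <;> simp
    rw [hsplit, ih (n + 1)]
    have h40 : (40 : Int) = ((40 : Nat) : Int) := rfl
    have hmem : ((PySem.Int.mod (n : Int) 40, a) : Int × Int).1 ∈ pvR40 := by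
      show PySem.Int.mod (n : Int) 40 ∈ pvR40
      rw [h40, PySem.Int.mod_natCast]
      unfold pvR40
      exact List.mem_map_of_mem (f := fun i => ((i : Nat) : Int)) (List.mem_range.mpr (Nat.mod_lt n (y := 40) (by norm_num)))
    rw [sum_ind_mem _ _ pvR40 pvR40_nodup hmem]
    show _ + (if a = PySem.List.pyGetD p (PySem.Int.mod (PySem.Int.mod (n : Int) 40) (PySem.List.len p)) 0 then (1:Int) else 0) = pvCnt p (a :: rest) n
    have hp : PySem.List.pyGetD p (PySem.Int.mod (PySem.Int.mod (n : Int) 40) (PySem.List.len p)) 0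
        = p.getD (n % p.length) 0 := by
      rw [h40, PySem.Int.mod_natCast, PySem.List.len_eq, PySem.Int.mod_natCast,
        PySem.List.pyGetD_natCast, Nat.mod_mod_of_dvd n hdvd]
    rw [hp]
    show _ = (if p.getD (n % p.length) 0 = a then (1 : Int) else 0) + pvCnt p rest (n + 1)
    rw [show ∀ x y : Int, (if x = y then (1:Int) else 0) = (if y = x then (1:Int) else 0) by
      intro x y; simp [eq_comm]]
    ring

-- the index list range(40) is what pyRange 0 40 1 enumerates
lemma pvR40_eq_pyRange : PySem.List.pyRange 0 40 1 = pvR40 := by decide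

-- the histogram loop is Counter(pairs)
lemma pvHist_eq_counter (answers : List Int) :
    pvHist answers =
      PySem.Dict.counter ((PySem.List.enumerate answers).map
        (fun ia => (PySem.Int.mod ia.1 40, ia.2))) := by
  rw [← PySem.Dict.foldl_insert_getD_add_one_eq_counter, List.foldl_map]
  rfl

-- B's whole score: pvDot of the one-pass histogram is the cyclic match count
lemma pvDot_eq_cnt (answers p : List Int) (hdvd : p.length ∣ 40) :
    pvDot (pvHist answers) p = pvCnt p answers 0 := by
  unfold pvDot
  rw [pvR40_eq_pyRange, pvHist_eq_counter]
  have : ∀ r : Int,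
      (PySem.Dict.counter ((PySem.List.enumerate answers).map
        (fun ia => (PySem.Int.mod ia.1 40, ia.2)))).getD
        (r, PySem.List.pyGetD p (PySem.Int.mod r (PySem.List.len p)) 0) 0
      = ((((PySem.List.enumerate answers).map
          (fun ia => (PySem.Int.mod ia.1 40, ia.2))).count
        (r, PySem.List.pyGetD p (PySem.Int.mod r (PySem.List.len p)) 0) : Nat) : Int) := by
    intro r
    exact PySem.Dict.getD_counter _ _
  simp only [this]
  exact dot_eq_cnt p hdvd answers 0

-- A's while loop computes the three cyclic match counts
lemma pvWhileA_eq (answers s1 s2 s3 p1 p2 p3 : List Int)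
    (hlen : answers.length ≤ 10000)
    (h1 : ∀ i, i < 10000 → s1.getD i 0 = p1.getD (i % p1.length) 0)
    (h2 : ∀ i, i < 10000 → s2.getD i 0 = p2.getD (i % p2.length) 0)
    (h3 : ∀ i, i < 10000 → s3.getD i 0 = p3.getD (i % p3.length) 0) :
    ∀ i c1 c2 c3, pvWhileA answers s1 s2 s3 i i c1 c2 c3 =
      (c1 + pvCnt p1 (answers.drop i) i, c2 + pvCnt p2 (answers.drop i) i,
       c3 + pvCnt p3 (answers.drop i) i) := by
  have main : ∀ k i c1 c2 c3, answers.length - i = k →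
      pvWhileA answers s1 s2 s3 i i c1 c2 c3 =
      (c1 + pvCnt p1 (answers.drop i) i, c2 + pvCnt p2 (answers.drop i) i,
       c3 + pvCnt p3 (answers.drop i) i) := by
    intro k
    induction k with
    | zero =>
      intro i c1 c2 c3 hk
      have hge : ¬ i < answers.length := by omega
      rw [pvWhileA, dif_neg hge, List.drop_eq_nil_of_le (by omega)]
      simp [pvCnt]
    | succ m ih =>
      intro i c1 c2 c3 hk
      have hi : i < answers.length := by omega
      have hi4 : i < 10000 := by omega
      rw [pvWhileA, dif_pos hi]
      have hj : ¬ i + 1 > answers.length := by omega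
      simp only [if_neg hj]
      have hdrop : answers.drop i = answers[i] :: answers.drop (i + 1) :=
        List.drop_eq_getElem_cons hi
      have hget : answers.getD i 0 = answers[i] := List.getD_eq_getElem answers 0 hi
      rw [ih (i + 1) _ _ _ (by omega)]
      rw [hdrop]
      simp only [pvCnt, hget, h1 i hi4, h2 i hi4, h3 i hi4]
      refine Prod.ext ?_ (Prod.ext ?_ ?_) <;> simp <;> split_ifs <;> ring
  intro i c1 c2 c3
  exact main (answers.length - i) i c1 c2 c3 rfl

lemma flatten_rep_getD (p : List Int) (d : Int) : ∀ (n : Nat) (i : Nat), i < n * p.length →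
    ((List.replicate n p).flatten).getD i d = p.getD (i % p.length) d := by
  intro n
  induction n with
  | zero => intro i h; omega
  | succ m ih =>
    intro i h
    rw [List.replicate_succ, List.flatten_cons]
    by_cases hi : i < p.length
    · rw [List.getD_append _ _ _ _ hi, Nat.mod_eq_of_lt hi]
    · push Not at hi
      have hm : (m + 1) * p.length = m * p.length + p.length := by ring
      rw [hm] at h
      rw [List.getD_append_right _ _ _ _ hi, ih (i - p.length) (by omega)]
      congr 1
      conv_rhs => rw [show i = (i - p.length) + 1 * p.length by omega]
      rw [Nat.add_mul_mod_self_right]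

lemma pyRepeat_getD (p : List Int) (n i : Nat) (h : i < n * p.length) (d : Int) :
    (PySem.List.pyRepeat p (n : Int)).getD i d = p.getD (i % p.length) d := by
  simp only [PySem.List.pyRepeat, Int.toNat_natCast]
  exact flatten_rep_getD p d n i h

-- A's nine-branch comparison tree + final sort equals B's max-then-filter over the scores dict
set_option maxHeartbeats 1000000 in
lemma tree_eq_filter (c1 c2 c3 : Int) :
    PySem.List.sorted
      (if c1 < c2 then
        (if c2 < c3 then [3] else if c2 > c3 then [2] else [2, 3])
      else if c1 > c2 then
        (if c1 < c3 then [3] else if c1 > c3 then [1] else [1, 3])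
      else
        (if c1 < c3 then [3] else if c1 > c3 then [1, 2] else [1, 2, 3]))
      (fun x => x) false =
    (let scores := (((PySem.Dict.empty : PySem.Dict Int Int).insert 1 c1).insert 2 c2).insert 3 c3
     let best := (PySem.Dict.values scores).foldl (fun m v => if v > m then v else m)
        (scores.getD 1 0)
     ([1, 2, 3] : List Int).filter (fun k => scores.getD k 0 == best)) := by
  have hv : PySem.Dict.values ((((PySem.Dict.empty : PySem.Dict Int Int).insert 1 c1).insert 2 c2).insert 3 c3) = [c1, c2, c3] := rfl
  have g1 : ((((PySem.Dict.empty : PySem.Dict Int Int).insert 1 c1).insert 2 c2).insert 3 c3).getD 1 0 = c1 := rfl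
  have g2 : ((((PySem.Dict.empty : PySem.Dict Int Int).insert 1 c1).insert 2 c2).insert 3 c3).getD 2 0 = c2 := rfl
  have g3 : ((((PySem.Dict.empty : PySem.Dict Int Int).insert 1 c1).insert 2 c2).insert 3 c3).getD 3 0 = c3 := rfl
  have hbeq : ∀ x y : Int, (x == y) = decide (x = y) := fun x y => rfl
  simp only [hv, g1, g2, g3, List.foldl, List.filter_cons, List.filter_nil, hbeq,
    decide_eq_true_eq]
  split_ifs <;> first | decide | omega

-- ===== VERDICT (by name: the statement is the Claim_ definition above) =====
theorem solution_spec : Claim_equal_solution := by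
  intro answers _hdom hpre
  have hlen : answers.length ≤ 10000 := hpre
  show solution answers = solution_alt answers
  unfold solution solution_alt
  dsimp only
  have h1 : ∀ i, i < 10000 →
      (PySem.List.pyRepeat [1, 2, 3, 4, 5] 2000).getD i 0 = ([1, 2, 3, 4, 5] : List Int).getD (i % ([1, 2, 3, 4, 5] : List Int).length) 0 := by
    intro i hi
    exact_mod_cast pyRepeat_getD [1, 2, 3, 4, 5] 2000 i (by simp; omega) 0
  have h2 : ∀ i, i < 10000 →
      (PySem.List.pyRepeat [2, 1, 2, 3, 2, 4, 2, 5] 1250).getD i 0 = ([2, 1, 2, 3, 2, 4, 2, 5] : List Int).getD (i % ([2, 1, 2, 3, 2, 4, 2, 5] : List Int).length) 0 := by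
    intro i hi
    exact_mod_cast pyRepeat_getD [2, 1, 2, 3, 2, 4, 2, 5] 1250 i (by simp; omega) 0
  have h3 : ∀ i, i < 10000 →
      (PySem.List.pyRepeat [3, 3, 1, 1, 2, 2, 4, 4, 5, 5] 1000).getD i 0 = ([3, 3, 1, 1, 2, 2, 4, 4, 5, 5] : List Int).getD (i % ([3, 3, 1, 1, 2, 2, 4, 4, 5, 5] : List Int).length) 0 := by
    intro i hi
    exact_mod_cast pyRepeat_getD [3, 3, 1, 1, 2, 2, 4, 4, 5, 5] 1000 i (by simp; omega) 0
  rw [pvWhileA_eq answers _ _ _ [1, 2, 3, 4, 5] [2, 1, 2, 3, 2, 4, 2, 5] [3, 3, 1, 1, 2, 2, 4, 4, 5, 5] hlen h1 h2 h3 0 0 0 0]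
  simp only [List.drop_zero, zero_add]
  rw [pvDot_eq_cnt answers [1, 2, 3, 4, 5] (by norm_num),
    pvDot_eq_cnt answers [2, 1, 2, 3, 2, 4, 2, 5] (by norm_num),
    pvDot_eq_cnt answers [3, 3, 1, 1, 2, 2, 4, 4, 5, 5] (by norm_num)]
  exact tree_eq_filter _ _ _
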